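-- pv_equiv track=rewrite | github.com/Kayce001/storyboard | src/storyboard_video/pipeline/frame_plan_text.py | filter_line_range
-- ===== SOURCE A (Python) =====
-- def build_line_order(line_refs: list[dict]) -> dict[str, int]:
--     return {str(item.get("line_id", "")).strip(): index for index, item in enumerate(line_refs)}
--
-- def filter_line_range(line_refs: list[dict], start_line_id: str, end_line_id: str) -> list[dict]:
--     order = build_line_order(line_refs)
--     if start_line_id not in order or end_line_id not in order:
--         return []
--     start_index = order[start_line_id]
--     end_index = order[end_line_id]
--     if end_index < start_index:
--         return []
--     return [dict(line) for line in line_refs[start_index : end_index + 1]]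
-- ===== SOURCE B (Python) =====
-- def filter_line_range(line_refs: list[dict], start_line_id: str, end_line_id: str) -> list[dict]:
--     # Single reverse scan building the output directly: the first end marker seen
--     # from the right is the last one overall; collect items leftwards until the
--     # first start marker from the right, which is the last start overall.
--     result = []
--     collecting = False
--     for item in reversed(line_refs):
--         key = str(item.get("line_id", "")).strip()
--         if collecting:
--             result.insert(0, dict(item))
--             if key == start_line_id:
--                 return result
--         elif key == end_line_id:
--             result.insert(0, dict(item))
--             if key == start_line_id:
--                 return result
--             collecting = True
--         elif key == start_line_id:
--             return []
--     return []
-- ===== Notes on version B (the rewrite author's own statement) =====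
-- stated objective: alternative
-- what changed: Replaces A's dict index plus index-arithmetic slice with a single right-to-left state-machine scan that builds the output list directly: it skips until the first end marker from the right, then collects items until the first start marker from the right.
import Mathlib
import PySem

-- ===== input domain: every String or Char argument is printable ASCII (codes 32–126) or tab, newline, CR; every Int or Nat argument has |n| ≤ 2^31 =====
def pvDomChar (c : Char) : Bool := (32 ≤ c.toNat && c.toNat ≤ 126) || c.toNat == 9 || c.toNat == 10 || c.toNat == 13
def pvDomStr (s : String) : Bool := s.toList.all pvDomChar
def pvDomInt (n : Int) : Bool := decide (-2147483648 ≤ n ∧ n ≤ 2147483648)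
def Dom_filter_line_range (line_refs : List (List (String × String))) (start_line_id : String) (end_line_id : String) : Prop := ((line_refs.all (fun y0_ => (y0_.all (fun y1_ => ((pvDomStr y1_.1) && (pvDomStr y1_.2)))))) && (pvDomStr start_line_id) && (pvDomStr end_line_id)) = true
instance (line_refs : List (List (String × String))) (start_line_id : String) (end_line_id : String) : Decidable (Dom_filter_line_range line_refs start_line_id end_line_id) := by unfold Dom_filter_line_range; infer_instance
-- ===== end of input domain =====

-- B replaces A's dict index + slice with a single reverse scan that builds the
-- output list directly (objective: alternative; return value only).

-- ===== PORT A =====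
-- str(item.get("line_id", "")).strip() — first-match lookup on the association list (Python dict get), then strip.
def pvLineKey (item : List (String × String)) : String :=
  PySem.Str.strip (((item.find? (fun p => p.1 == "line_id")).map (·.2)).getD "")

-- dict comprehension over enumerate(line_refs): last occurrence of a key wins
def build_line_order (line_refs : List (List (String × String))) : PySem.Dict String Int :=
  (PySem.List.enumerate line_refs 0).foldl
    (fun d p => d.insert (pvLineKey p.2) p.1) PySem.Dict.empty

def filter_line_range (line_refs : List (List (String × String))) (start_line_id : String) (end_line_id : String) : List (List (String × String)) :=
  let order := build_line_order line_refs
  if !(order.contains start_line_id) || !(order.contains end_line_id) then []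
  else
    let start_index := (order.get? start_line_id).getD 0
    let end_index := (order.get? end_line_id).getD 0
    if end_index < start_index then []
    else (PySem.List.slice line_refs (some start_index) (some (end_index + 1))).map (fun line => line)

-- ===== PORT B =====
-- collecting phase: prepend each item; stop with the accumulated list at the first start marker
def pvCollect (s : String) : List (List (String × String)) → List (List (String × String)) → List (List (String × String))
  | [], _ => []
  | item :: rest, acc =>
      if pvLineKey item == s then item :: acc else pvCollect s rest (item :: acc)

-- seeking phase over the reversed list: skip until the first end marker from the right
def pvSeek (s e : String) : List (List (String × String)) → List (List (String × String))
  | [] => []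
  | item :: rest =>
      let key := pvLineKey item
      if key == e then
        if key == s then [item] else pvCollect s rest [item]
      else if key == s then []
      else pvSeek s e rest

def filter_line_range_alt (line_refs : List (List (String × String))) (start_line_id : String) (end_line_id : String) : List (List (String × String)) :=
  pvSeek start_line_id end_line_id line_refs.reverse

-- ===== PRECONDITION & SPEC =====
def Spec_filter_line_range (line_refs : List (List (String × String))) (start_line_id : String) (end_line_id : String) (out : List (List (String × String))) : Prop := out = filter_line_range_alt line_refs start_line_id end_line_id
instance (line_refs : List (List (String × String))) (start_line_id : String) (end_line_id : String) (out : List (List (String × String))) : Decidable (Spec_filter_line_range line_refs start_line_id end_line_id out) := by unfold Spec_filter_line_range; infer_instance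

-- ===== CLAIM (what is proved, stated in full; the proofs are below) =====
def Claim_equal_filter_line_range : Prop := ∀ (line_refs : List (List (String × String))) (start_line_id : String) (end_line_id : String), Dom_filter_line_range line_refs start_line_id end_line_id → Spec_filter_line_range line_refs start_line_id end_line_id (filter_line_range line_refs start_line_id end_line_id)

-- ===== LEMMAS AND PROOFS =====

-- common characterisation: on the reversed list, A's last-occurrence indices become first occurrences
def specR (s e : String) (rl : List (List (String × String))) : List (List (String × String)) :=
  match rl.findIdx? (fun item => pvLineKey item == s), rl.findIdx? (fun item => pvLineKey item == e) with
  | some js, some je => if js < je then [] else ((rl.drop je).take (js - je + 1)).reverse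
  | _, _ => []

-- the dict built by A's fold answers get? k with the last index whose key equals k
theorem get?_foldl_insert_key (l : List (Int × List (String × String)))
    (d : PySem.Dict String Int) (k : String) :
    (l.foldl (fun d p => d.insert (pvLineKey p.2) p.1) d).get? k
      = l.foldl (fun o p => if pvLineKey p.2 == k then some p.1 else o) (d.get? k) := by
  induction l generalizing d with
  | nil => rfl
  | cons p t ih =>
      simp only [List.foldl_cons, ih]
      congr 1
      by_cases h : pvLineKey p.2 = k
      · simp [h, PySem.Dict.get?_insert_self]
      · simp [h, PySem.Dict.get?_insert_of_ne _ _ (fun hk => h hk.symm)]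

-- the last-match fold equals the first match on the reversed list
theorem foldl_last_eq_findIdx?_reverse (l : List (List (String × String))) (k : String)
    (o : Option Int) (i0 : Int) :
    ((PySem.List.enumerate l i0).foldl
        (fun o p => if pvLineKey p.2 == k then some p.1 else o) o)
      = match l.reverse.findIdx? (fun item => pvLineKey item == k) with
        | some j => some (i0 + ((l.length - 1 - j : Nat) : Int))
        | none => o := by
  induction l using List.reverseRecOn generalizing o i0 with
  | nil => rfl
  | append_singleton l' x ih =>
      rw [PySem.List.enumerate_append, List.foldl_append]
      simp only [PySem.List.enumerate_cons, PySem.List.enumerate_nil, List.foldl_cons,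
        List.foldl_nil, List.reverse_append, List.reverse_cons, List.reverse_nil,
        List.nil_append, List.cons_append, List.findIdx?_cons, List.length_append,
        List.length_cons, List.length_nil]
      cases h : pvLineKey x == k with
      | true =>
          simp
      | false =>
          simp only [Bool.false_eq_true, if_false]
          rw [ih]
          cases hf : l'.reverse.findIdx? (fun item => pvLineKey item == k) with
          | none => simp
          | some j =>
              simp only [Option.map_some]
              congr 2
              omega

-- collecting phase characterised by the first start marker in the remaining reversed list
theorem pvCollect_eq (s : String) (rest acc : List (List (String × String))) :
    pvCollect s rest acc
      = match rest.findIdx? (fun item => pvLineKey item == s) with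
        | some j => (rest.take (j + 1)).reverse ++ acc
        | none => [] := by
  induction rest generalizing acc with
  | nil => rfl
  | cons item t ih =>
      simp only [pvCollect, List.findIdx?_cons]
      cases h : pvLineKey item == s with
      | true => simp
      | false =>
          simp only [Bool.false_eq_true, if_false]
          rw [ih]
          cases hf : t.findIdx? (fun item => pvLineKey item == s) with
          | none => simp
          | some j => simp [List.take_succ_cons]

-- B's reverse scan computes specR
theorem pvSeek_eq_specR (s e : String) (rl : List (List (String × String))) :
    pvSeek s e rl = specR s e rl := by
  induction rl with
  | nil => rfl
  | cons item rest ih =>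
      simp only [pvSeek, specR, List.findIdx?_cons]
      cases he : pvLineKey item == e with
      | true =>
          cases hs : pvLineKey item == s with
          | true => simp
          | false =>
              simp only [pvCollect_eq]
              cases hf : rest.findIdx? (fun item => pvLineKey item == s) with
              | none => simp
              | some j => simp [List.take_succ_cons]
      | false =>
          cases hs : pvLineKey item == s with
          | true =>
              simp
              cases hf : rest.findIdx? (fun item => pvLineKey item == e) with
              | none => simp
              | some j => simp
          | false =>
              simp only [ih, specR]
              cases hfs : rest.findIdx? (fun item => pvLineKey item == s) with
              | none => simp
              | some js =>
                  cases hfe : rest.findIdx? (fun item => pvLineKey item == e) with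
                  | none => simp
                  | some je =>
                      simp only [Option.map_some]
                      have h1 : js + 1 < je + 1 ↔ js < je := by omega
                      have h2 : js + 1 - (je + 1) = js - je := by omega
                      simp [h1, h2, List.drop_succ_cons]

-- indices returned by findIdx? are in range
theorem findIdx?_lt_length {α : Type} (p : α → Bool) (l : List α) (j : Nat)
    (h : l.findIdx? p = some j) : j < l.length := by
  induction l generalizing j with
  | nil => simp at h
  | cons a t ih =>
      rw [List.findIdx?_cons] at h
      cases hp : p a with
      | true =>
          rw [if_pos hp] at h
          simp only [Option.some.injEq] at h
          simp [← h]
      | false =>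
          have hp' : ¬ (p a) = true := by simp [hp]
          rw [if_neg hp'] at h
          simp only [Option.map_eq_some_iff] at h
          obtain ⟨j', hj', rfl⟩ := h
          have := ih j' hj'
          simp only [List.length_cons]
          omega

-- reversing an inclusive segment of the reversed list
theorem seg_reverse {α : Type} (l : List α) (a b : Nat) (hab : a + b ≤ l.length) :
    ((l.reverse.drop a).take b).reverse = (l.drop (l.length - a - b)).take b := by
  apply List.ext_getElem
  · simp; omega
  · intro i h1 h2
    simp only [List.getElem_reverse, List.getElem_take, List.getElem_drop,
      List.length_reverse, List.length_take, List.length_drop] at h1 h2 ⊢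
    congr 1
    omega

-- A computes specR on the reversed list
theorem filter_eq_specR (l : List (List (String × String))) (s e : String) :
    filter_line_range l s e = specR s e l.reverse := by
  unfold filter_line_range build_line_order
  have hs := get?_foldl_insert_key (PySem.List.enumerate l 0) PySem.Dict.empty s
  have he := get?_foldl_insert_key (PySem.List.enumerate l 0) PySem.Dict.empty e
  simp only [PySem.Dict.get?_empty] at hs he
  rw [foldl_last_eq_findIdx?_reverse] at hs he
  simp only [PySem.Dict.contains_eq_isSome_get?, hs, he, specR]
  cases hfs : l.reverse.findIdx? (fun item => pvLineKey item == s) with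
  | none => simp
  | some js =>
      cases hfe : l.reverse.findIdx? (fun item => pvLineKey item == e) with
      | none => simp
      | some je =>
          have hjs : js < l.length := by
            have := findIdx?_lt_length _ _ _ hfs; simpa using this
          have hje : je < l.length := by
            have := findIdx?_lt_length _ _ _ hfe; simpa using this
          simp only [Option.isSome_some, Bool.not_true, Bool.or_self, Bool.false_eq_true,
            if_false, Option.getD_some, zero_add]
          have hlt : (((l.length - 1 - je : Nat) : Int) < ((l.length - 1 - js : Nat) : Int)) ↔ js < je := by
            omega
          by_cases h : js < je
          · simp [hlt, h]
          · rw [if_neg (by rw [hlt]; exact h), if_neg h]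
            have hcast : ((l.length - 1 - je : Nat) : Int) + 1 = ((l.length - je : Nat) : Int) := by
              omega
            rw [hcast, PySem.List.slice_natCast, List.map_id']
            rw [seg_reverse l je (js - je + 1) (by omega)]
            have e1 : l.length - je - (js - je + 1) = l.length - 1 - js := by omega
            have e2 : l.length - je - (l.length - 1 - js) = js - je + 1 := by omega
            rw [e1, e2]

-- ===== VERDICT (by name: the statement is the Claim_ definition above) =====
theorem filter_line_range_spec : Claim_equal_filter_line_range := by
  intro l s e _
  unfold Spec_filter_line_range filter_line_range_alt
  rw [filter_eq_specR, pvSeek_eq_specR]
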